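-- pv_equiv track=rewrite | github.com/Changwanseo/FunID | funid/src/tree_interpretation.py | divide_by_max_len
-- ===== SOURCE A (Python) =====
-- def divide_by_max_len(string, max_len, sep=" "):
--     final_string = ""
--     tmp_string = ""
--
--     for char in string:
--         if char == sep:
--             if len(tmp_string) < max_len:
--                 tmp_string += char
--             else:
--                 tmp_string += char
--                 final_string += tmp_string + "\n"
--                 tmp_string = ""
--         else:
--             tmp_string += char
--     final_string += tmp_string
--     return final_string
-- ===== SOURCE B (Python) =====
-- def divide_by_max_len(string, max_len, sep=" "):
--     # A only ever breaks at single-character separators (it compares each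
--     # char to sep), so any other sep leaves the string untouched.
--     if len(sep) != 1:
--         return string
--     # Pass 1: greedily group the sep-separated tokens into lines.
--     words = string.split(sep)
--     groups = [[words[0]]]
--     cur_len = len(words[0])
--     for w in words[1:]:
--         if cur_len < max_len:
--             groups[-1].append(w)
--             cur_len += 1 + len(w)
--         else:
--             groups.append([w])
--             cur_len = len(w)
--     # Pass 2: join each group with sep, and the lines with sep + newline.
--     return (sep + "\n").join(sep.join(g) for g in groups)
-- ===== Notes on version B (the rewrite author's own statement) =====
-- stated objective: faster
-- what changed: B replaces A's character-by-character Python loop with repeated string concatenation by a two-pass token algorithm: split at the separator, greedily group tokens into lines tracking only an integer length, then assemble with two joins (C-level split/join instead of per-char interpreted work).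
import Mathlib
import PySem

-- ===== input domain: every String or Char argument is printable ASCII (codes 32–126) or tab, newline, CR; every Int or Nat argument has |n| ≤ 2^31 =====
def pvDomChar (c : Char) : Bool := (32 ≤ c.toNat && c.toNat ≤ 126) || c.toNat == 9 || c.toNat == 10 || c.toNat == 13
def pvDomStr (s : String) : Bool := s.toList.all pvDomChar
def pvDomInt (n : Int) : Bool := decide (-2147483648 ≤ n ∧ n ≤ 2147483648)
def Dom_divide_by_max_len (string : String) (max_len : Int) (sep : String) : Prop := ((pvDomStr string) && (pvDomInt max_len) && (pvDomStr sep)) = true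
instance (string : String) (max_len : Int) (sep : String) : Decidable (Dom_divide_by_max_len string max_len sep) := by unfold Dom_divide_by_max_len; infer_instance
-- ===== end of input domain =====

set_option maxRecDepth 8000


-- B replaces A's character-by-character scan with a two-pass token algorithm (split, greedily
-- group tokens into lines, join twice); proved to return the same string on all inputs.

-- ===== PORT A =====
-- one step of A's for-loop over the characters; state = (final_string, tmp_string)
def stepA (max_len : Int) (sepl : List Char) (st : List Char × List Char) (c : Char) : List Char × List Char :=
  if [c] = sepl then
    if (st.2.length : Int) < max_len then (st.1, st.2 ++ [c])
    else (st.1 ++ st.2 ++ [c] ++ ['\n'], [])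
  else (st.1, st.2 ++ [c])

def divide_by_max_len (string : String) (max_len : Int) (sep : String) : String :=
  let st := string.toList.foldl (stepA max_len sep.toList) ([], [])
  String.ofList (st.1 ++ st.2)

-- ===== PORT B =====
-- `s.join(pieces)` on char lists (Source B uses str.join)
def joinSep (s : List Char) : List (List Char) → List Char
  | [] => []
  | [w] => w
  | w :: ws => w ++ s ++ joinSep s ws

-- pass 1 of Source B: greedily group the tokens into lines, tracking only the running line length
def groupsB (m : Int) : List (List Char) → Int → List (List Char) → List (List (List Char))
  | cur, _, [] => [cur]
  | cur, curLen, w :: ws =>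
      if curLen < m then groupsB m (cur ++ [w]) (curLen + 1 + (w.length : Int)) ws
      else cur :: groupsB m [w] (w.length : Int) ws

def divide_by_max_len_alt (string : String) (max_len : Int) (sep : String) : String :=
  if sep.toList.length ≠ 1 then string
  else
    match sep.toList, PySem.Chars.splitOn string.toList sep.toList with
    | [sc], w0 :: rest =>
        String.ofList (joinSep [sc, '\n']
          ((groupsB max_len [w0] (w0.length : Int) rest).map (joinSep [sc])))
    | _, _ => string   -- unreachable: sep has one char and split is never empty

-- ===== PRECONDITION & SPEC =====
def Spec_divide_by_max_len (string : String) (max_len : Int) (sep : String) (out : String) : Prop := out = divide_by_max_len_alt string max_len sep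
instance (string : String) (max_len : Int) (sep : String) (out : String) : Decidable (Spec_divide_by_max_len string max_len sep out) := by unfold Spec_divide_by_max_len; infer_instance

-- ===== CLAIM (what is proved, stated in full; the proofs are below) =====
def Claim_equal_divide_by_max_len : Prop := ∀ (string : String) (max_len : Int) (sep : String), Dom_divide_by_max_len string max_len sep → Spec_divide_by_max_len string max_len sep (divide_by_max_len string max_len sep)

-- ===== LEMMAS AND PROOFS =====

-- proof-internal intermediate: A's char scan rephrased as a fold over the tokens
def stepB (max_len : Int) (sepl : List Char) (st : List Char × List Char) (w : List Char) : List Char × List Char :=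
  if (st.2.length : Int) < max_len then (st.1, st.2 ++ sepl ++ w)
  else (st.1 ++ st.2 ++ sepl ++ ['\n'], w)

-- reference split at a single separator character (all pieces, empties kept)
def mySplit (sc : Char) : List Char → List (List Char)
  | [] => [[]]
  | c :: cs =>
      if c = sc then [] :: mySplit sc cs
      else
        match mySplit sc cs with
        | [] => [[c]]
        | w :: ws => (c :: w) :: ws

theorem mySplit_ne_nil (sc : Char) (cs : List Char) : mySplit sc cs ≠ [] := by
  induction cs with
  | nil => simp [mySplit]
  | cons c cs ih =>
    simp only [mySplit]
    split_ifs
    · simp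
    · cases h : mySplit sc cs <;> simp

theorem splitOn_go_single (sc : Char) : ∀ (fuel : Nat) (l cur : List Char) (acc : List (List Char)),
    l.length < fuel →
    PySem.Chars.splitOn.go [sc] fuel l cur acc =
      acc.reverse ++ (match mySplit sc l with
                      | [] => []
                      | w :: ws => (cur.reverse ++ w) :: ws) := by
  intro fuel
  induction fuel with
  | zero => intro l cur acc h; omega
  | succ f ih =>
    intro l cur acc h
    cases l with
    | nil => simp [PySem.Chars.splitOn.go, mySplit]
    | cons c rest =>
      simp only [PySem.Chars.splitOn.go, List.isPrefixOf]
      by_cases hc : c = sc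
      · subst hc
        simp only [beq_self_eq_true, List.length_cons, List.length_nil,
          List.drop_succ_cons, List.drop_zero]
        rw [ih rest [] (cur.reverse :: acc) (by simpa using Nat.lt_of_succ_lt_succ h)]
        obtain ⟨w, ws, hw⟩ : ∃ w ws, mySplit c rest = w :: ws := by
          cases hmw : mySplit c rest with
          | nil => exact absurd hmw (mySplit_ne_nil c rest)
          | cons w ws => exact ⟨w, ws, rfl⟩
        simp [mySplit, hw]
      · have : (sc == c) = false := by
          simp only [beq_eq_false_iff_ne, ne_eq]
          exact fun h' => hc h'.symm
        simp only [this]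
        rw [ih rest (c :: cur) acc (by simpa using Nat.lt_of_succ_lt_succ h)]
        obtain ⟨w, ws, hw⟩ : ∃ w ws, mySplit sc rest = w :: ws := by
          cases hmw : mySplit sc rest with
          | nil => exact absurd hmw (mySplit_ne_nil sc rest)
          | cons w ws => exact ⟨w, ws, rfl⟩
        simp only [mySplit, hc, if_false, hw]
        simp

theorem splitOn_single (sc : Char) (s : List Char) :
    PySem.Chars.splitOn s [sc] = mySplit sc s := by
  unfold PySem.Chars.splitOn
  rw [splitOn_go_single sc (s.length + 1) s [] [] (by omega)]
  obtain ⟨w, ws, hw⟩ : ∃ w ws, mySplit sc s = w :: ws := by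
    cases hmw : mySplit sc s with
    | nil => exact absurd hmw (mySplit_ne_nil sc s)
    | cons w ws => exact ⟨w, ws, rfl⟩
  simp [hw]

theorem main_lemma (sc : Char) (m : Int) : ∀ (cs F T w0 : List Char) (rest : List (List Char)),
    mySplit sc cs = w0 :: rest →
    (cs.foldl (stepA m [sc]) (F, T)).1 ++ (cs.foldl (stepA m [sc]) (F, T)).2
      = (rest.foldl (stepB m [sc]) (F, T ++ w0)).1 ++ (rest.foldl (stepB m [sc]) (F, T ++ w0)).2 := by
  intro cs
  induction cs with
  | nil =>
    intro F T w0 rest h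
    simp only [mySplit, List.cons.injEq] at h
    obtain ⟨h1, h2⟩ := h
    subst h1; subst h2
    simp
  | cons c cs ih =>
    intro F T w0 rest h
    by_cases hc : c = sc
    · subst hc
      obtain ⟨w, ws, hw⟩ : ∃ w ws, mySplit c cs = w :: ws := by
        cases hmw : mySplit c cs with
        | nil => exact absurd hmw (mySplit_ne_nil c cs)
        | cons w ws => exact ⟨w, ws, rfl⟩
      simp [mySplit, hw] at h
      obtain ⟨h1, h2⟩ := h
      subst h1
      subst h2
      simp only [List.foldl_cons]
      by_cases hl : (T.length : Int) < m
      · have hA : stepA m [c] (F, T) c = (F, T ++ [c]) := by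
          simp [stepA, hl]
        have hB : stepB m [c] (F, T ++ []) w = (F, T ++ [c] ++ w) := by
          simp [stepB, hl]
        rw [hA, hB, ih F (T ++ [c]) w ws hw]
      · have hA : stepA m [c] (F, T) c = (F ++ T ++ [c] ++ ['\n'], []) := by
          simp [stepA, hl]
        have hB : stepB m [c] (F, T ++ []) w = (F ++ T ++ [c] ++ ['\n'], w) := by
          simp [stepB, hl]
        rw [hA, hB, ih (F ++ T ++ [c] ++ ['\n']) [] w ws hw]
        simp
    · obtain ⟨w, ws, hw⟩ : ∃ w ws, mySplit sc cs = w :: ws := by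
        cases hmw : mySplit sc cs with
        | nil => exact absurd hmw (mySplit_ne_nil sc cs)
        | cons w ws => exact ⟨w, ws, rfl⟩
      simp only [mySplit, hc, if_false, hw, List.cons.injEq] at h
      obtain ⟨h1, h2⟩ := h
      subst h1
      rw [← h2]
      simp only [List.foldl_cons]
      have hA : stepA m [sc] (F, T) c = (F, T ++ [c]) := by
        simp [stepA, hc]
      rw [hA, ih F (T ++ [c]) w ws hw]
      simp

theorem joinSep_append_singleton (s : List Char) :
    ∀ (cur : List (List Char)) (w : List Char), cur ≠ [] →
      joinSep s (cur ++ [w]) = joinSep s cur ++ s ++ w := by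
  intro cur
  induction cur with
  | nil => intro w h; exact absurd rfl h
  | cons a l ih =>
    intro w _
    cases l with
    | nil => simp [joinSep]
    | cons b l' =>
      have := ih w (by simp)
      simp only [List.cons_append, joinSep] at *
      rw [this]
      simp

theorem groupsB_ne_nil (m : Int) (cur : List (List Char)) (curLen : Int) (ws : List (List Char)) :
    groupsB m cur curLen ws ≠ [] := by
  induction ws generalizing cur curLen with
  | nil => simp [groupsB]
  | cons w ws ih =>
    simp only [groupsB]
    split_ifs
    · exact ih _ _
    · simp

theorem joinSep_cons_of_ne_nil (s x : List Char) (l : List (List Char)) (h : l ≠ []) :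
    joinSep s (x :: l) = x ++ s ++ joinSep s l := by
  cases l with
  | nil => exact absurd rfl h
  | cons b l' => rfl

theorem foldB_eq_groups (m : Int) (sc : Char) :
    ∀ (ws : List (List Char)) (F : List Char) (cur : List (List Char)) (curLen : Int),
      cur ≠ [] → curLen = ((joinSep [sc] cur).length : Int) →
      (ws.foldl (stepB m [sc]) (F, joinSep [sc] cur)).1
        ++ (ws.foldl (stepB m [sc]) (F, joinSep [sc] cur)).2
      = F ++ joinSep [sc, '\n'] ((groupsB m cur curLen ws).map (joinSep [sc])) := by
  intro ws
  induction ws with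
  | nil =>
    intro F cur curLen hcur hlen
    simp [groupsB, joinSep]
  | cons w ws ih =>
    intro F cur curLen hcur hlen
    simp only [List.foldl_cons, groupsB]
    by_cases hl : curLen < m
    · have hcond : ((joinSep [sc] cur).length : Int) < m := by rw [← hlen]; exact hl
      have hB : stepB m [sc] (F, joinSep [sc] cur) w = (F, joinSep [sc] (cur ++ [w])) := by
        simp only [stepB, hcond, if_pos]
        rw [joinSep_append_singleton [sc] cur w hcur]
      rw [hB, if_pos hl,
        ih F (cur ++ [w]) (curLen + 1 + (w.length : Int)) (by simp) (by
          rw [joinSep_append_singleton [sc] cur w hcur, hlen]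
          simp only [List.length_append, List.length_cons, List.length_nil]
          push_cast; ring)]
    · have hcond : ¬ ((joinSep [sc] cur).length : Int) < m := by rw [← hlen]; exact hl
      have hB : stepB m [sc] (F, joinSep [sc] cur) w
          = (F ++ joinSep [sc] cur ++ [sc] ++ ['\n'], w) := by
        simp [stepB, hcond]
      have hw1 : w = joinSep [sc] [w] := rfl
      rw [hB, if_neg hl]
      rw [show (F ++ joinSep [sc] cur ++ [sc] ++ ['\n'], w)
            = (F ++ joinSep [sc] cur ++ [sc] ++ ['\n'], joinSep [sc] [w]) from by rw [← hw1]]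
      rw [ih (F ++ joinSep [sc] cur ++ [sc] ++ ['\n']) [w] (w.length : Int) (by simp) (by simp [joinSep])]
      rw [List.map_cons,
        joinSep_cons_of_ne_nil [sc, '\n'] (joinSep [sc] cur)
          ((groupsB m [w] (w.length : Int) ws).map (joinSep [sc]))
          (by simp [groupsB_ne_nil])]
      simp

-- multi-character (or empty) separator: A's loop never matches, the string passes through
theorem trivial_fold (m : Int) (sepl : List Char) (hs : sepl.length ≠ 1) :
    ∀ (cs F T : List Char), cs.foldl (stepA m sepl) (F, T) = (F, T ++ cs) := by
  intro cs
  induction cs with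
  | nil => intro F T; simp
  | cons c cs ih =>
    intro F T
    have : ¬ ([c] = sepl) := by
      intro h; apply hs; rw [← h]; rfl
    simp only [List.foldl_cons, stepA, this, if_false]
    rw [ih F (T ++ [c])]
    simp

-- ===== VERDICT (by name: the statement is the Claim_ definition above) =====
theorem divide_by_max_len_spec : Claim_equal_divide_by_max_len := by
  intro string max_len sep _
  unfold Spec_divide_by_max_len divide_by_max_len divide_by_max_len_alt
  by_cases h1 : sep.toList.length = 1
  · obtain ⟨sc, hsc⟩ : ∃ sc, sep.toList = [sc] := by
      cases hs : sep.toList with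
      | nil => simp [hs] at h1
      | cons a l =>
        cases l with
        | nil => exact ⟨a, rfl⟩
        | cons b l' => simp [hs] at h1
    rw [hsc]
    simp only [List.length_singleton, ne_eq, not_true_eq_false, if_false]
    rw [splitOn_single sc string.toList]
    obtain ⟨w, ws, hw⟩ : ∃ w ws, mySplit sc string.toList = w :: ws := by
      cases hmw : mySplit sc string.toList with
      | nil => exact absurd hmw (mySplit_ne_nil sc string.toList)
      | cons w ws => exact ⟨w, ws, rfl⟩
    rw [hw]
    have h2 := main_lemma sc max_len string.toList [] [] w ws hw
    simp only [List.nil_append] at h2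
    have h3 := foldB_eq_groups max_len sc ws [] [w] (w.length : Int) (by simp) (by simp [joinSep])
    simp only [joinSep, List.nil_append] at h3
    rw [h2, h3]
  · simp only [ne_eq, h1, not_false_eq_true, if_true]
    rw [trivial_fold max_len sep.toList h1 string.toList [] []]
    simp
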